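-- pv_equiv track=rewrite | github.com/DPNT-Sourcecode/CHK-qqid01 | lib/solutions/CHK/checkout_solution.py | price_promotion_calc
-- ===== SOURCE A (Python) =====
-- def price_promotion_calc(promotion_list, no_item, total_price, unit_price):
--     """
--     Calculate the price based on the various promotions
--     :param promotion_list: list of promotions to apply
--     :param no_item: no items purchased
--     :param total_price: current total price\
--     :param unit_price: price of one unit
--     :return: total price based on promotions
--     """
--     if promotion_list:
--         no_item_promo, price_promo = promotion_list.pop(0)
--         no_promo_applied = no_item // no_item_promo
--         total_price += no_promo_applied * price_promo
--         return price_promotion_calc(promotion_list, no_item - (no_promo_applied * no_item_promo), total_price, unit_price)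
--     else:
--         return total_price + no_item * unit_price
-- ===== SOURCE B (Python) =====
-- def price_promotion_calc(promotion_list, no_item, total_price, unit_price):
--     while promotion_list:
--         no_item_promo, price_promo = promotion_list.pop(0)
--         applied = no_item // no_item_promo
--         total_price += applied * price_promo
--         no_item -= applied * no_item_promo
--     return total_price + no_item * unit_price
-- ===== Notes on version B (the rewrite author's own statement) =====
-- stated objective: simpler
-- what changed: Replaces A's tail recursion (re-calling itself with updated accumulators) by a single while loop that consumes the list with pop(0) and keeps no_item/total_price as locals, preserving the in-place emptying of the caller's list.
import Mathlib
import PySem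

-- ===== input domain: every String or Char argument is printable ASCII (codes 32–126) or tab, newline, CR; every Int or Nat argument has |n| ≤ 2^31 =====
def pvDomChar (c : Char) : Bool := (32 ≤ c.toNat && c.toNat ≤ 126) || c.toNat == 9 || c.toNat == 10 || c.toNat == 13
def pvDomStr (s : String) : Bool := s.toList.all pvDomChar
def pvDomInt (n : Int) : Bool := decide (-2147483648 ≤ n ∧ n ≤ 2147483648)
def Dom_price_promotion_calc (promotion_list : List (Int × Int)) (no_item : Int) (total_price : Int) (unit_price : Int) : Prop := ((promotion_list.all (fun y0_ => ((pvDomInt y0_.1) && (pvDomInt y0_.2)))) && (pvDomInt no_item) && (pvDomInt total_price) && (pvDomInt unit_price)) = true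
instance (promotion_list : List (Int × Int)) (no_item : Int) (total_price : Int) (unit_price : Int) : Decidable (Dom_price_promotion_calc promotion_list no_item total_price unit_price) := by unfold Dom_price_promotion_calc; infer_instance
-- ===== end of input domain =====

-- B replaces A's tail recursion by a single loop over the promotion list (simpler decomposition).
-- Both A and B mutate promotion_list to empty via pop(0); the equivalence proved is about the return value.


-- ===== PORT A =====
-- literal transliteration of A: pop(0), floor division, recursive call with updated accumulators
def price_promotion_calc (promotion_list : List (Int × Int)) (no_item : Int) (total_price : Int) (unit_price : Int) : Int :=
  match promotion_list with
  | (no_item_promo, price_promo) :: rest =>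
      let no_promo_applied := PySem.Int.floordiv no_item no_item_promo
      price_promotion_calc rest (no_item - no_promo_applied * no_item_promo)
        (total_price + no_promo_applied * price_promo) unit_price
  | [] => total_price + no_item * unit_price

-- ===== PORT B =====
-- B's while loop over the list with local state (no_item, total_price), then one final return
def price_promotion_calc_alt (promotion_list : List (Int × Int)) (no_item : Int) (total_price : Int) (unit_price : Int) : Int :=
  let s := promotion_list.foldl
    (fun (st : Int × Int) p =>
      let applied := PySem.Int.floordiv st.1 p.1
      (st.1 - applied * p.1, st.2 + applied * p.2))
    (no_item, total_price)
  s.2 + s.1 * unit_price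

-- ===== PRECONDITION & SPEC =====
-- Pre_ excludes promotions with 0 items, on which Python A raises ZeroDivisionError.
def Pre_price_promotion_calc (promotion_list : List (Int × Int)) (no_item : Int) (total_price : Int) (unit_price : Int) : Prop :=
  ∀ p ∈ promotion_list, p.1 ≠ 0
instance (promotion_list : List (Int × Int)) (no_item : Int) (total_price : Int) (unit_price : Int) : Decidable (Pre_price_promotion_calc promotion_list no_item total_price unit_price) := by unfold Pre_price_promotion_calc; infer_instance
def pvWitness_price_promotion_calc : (List (Int × Int)) × Int × Int × Int := ([(3, 130), (2, 90)], 7, 0, 50)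

def Spec_price_promotion_calc (promotion_list : List (Int × Int)) (no_item : Int) (total_price : Int) (unit_price : Int) (out : Int) : Prop := out = price_promotion_calc_alt promotion_list no_item total_price unit_price
instance (promotion_list : List (Int × Int)) (no_item : Int) (total_price : Int) (unit_price : Int) (out : Int) : Decidable (Spec_price_promotion_calc promotion_list no_item total_price unit_price out) := by unfold Spec_price_promotion_calc; infer_instance

-- ===== CLAIM (what is proved, stated in full; the proofs are below) =====
def Claim_equal_price_promotion_calc : Prop := ∀ (promotion_list : List (Int × Int)) (no_item : Int) (total_price : Int) (unit_price : Int), Dom_price_promotion_calc promotion_list no_item total_price unit_price → Pre_price_promotion_calc promotion_list no_item total_price unit_price → Spec_price_promotion_calc promotion_list no_item total_price unit_price (price_promotion_calc promotion_list no_item total_price unit_price)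

-- ===== LEMMAS AND PROOFS =====
theorem price_promotion_eq (promotion_list : List (Int × Int)) :
    ∀ (no_item total_price unit_price : Int),
      price_promotion_calc promotion_list no_item total_price unit_price
        = price_promotion_calc_alt promotion_list no_item total_price unit_price := by
  induction promotion_list with
  | nil => intro ni tp up; rfl
  | cons p rest ih =>
      intro ni tp up
      obtain ⟨nip, pp⟩ := p
      simp only [price_promotion_calc, price_promotion_calc_alt, List.foldl_cons] at *
      exact ih _ _ up

-- ===== VERDICT (by name: the statement is the Claim_ definition above) =====
theorem price_promotion_calc_spec : Claim_equal_price_promotion_calc := by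
  intro pl ni tp up _ _
  unfold Spec_price_promotion_calc
  exact price_promotion_eq pl ni tp up
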